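-- pv_equiv track=rewrite | github.com/SamHATIT/digital-humans-production | backend/app/services/phased_build_executor.py | _group_by_object
-- ===== SOURCE A (Python) =====
-- from typing import Dict, List, Any, Optional
--
-- def _group_by_object(tasks: List[Dict]) -> List[List[Dict]]:
--     """Groupe les tâches Phase 1 par objet cible."""
--     objects = {}
--     for task in tasks:
--         # Try to extract target object from task
--         obj = task.get("target_object") or task.get("object_name") or "default"
--         if obj not in objects:
--             objects[obj] = []
--         objects[obj].append(task)
--     return list(objects.values())
-- ===== SOURCE B (Python) =====
-- def _group_by_object(tasks):
--     """Groupe les tâches Phase 1 par objet cible."""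
--     def key(task):
--         return task.get("target_object") or task.get("object_name") or "default"
--     order = []
--     for task in tasks:
--         k = key(task)
--         if k not in order:
--             order.append(k)
--     return [[task for task in tasks if key(task) == k] for k in order]
-- ===== Notes on version B (the rewrite author's own statement) =====
-- stated objective: alternative
-- what changed: Instead of one pass that grows per-key lists inside a dict, B first collects the distinct group keys in first-appearance order and then builds each group by filtering the task list per key.
import Mathlib
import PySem

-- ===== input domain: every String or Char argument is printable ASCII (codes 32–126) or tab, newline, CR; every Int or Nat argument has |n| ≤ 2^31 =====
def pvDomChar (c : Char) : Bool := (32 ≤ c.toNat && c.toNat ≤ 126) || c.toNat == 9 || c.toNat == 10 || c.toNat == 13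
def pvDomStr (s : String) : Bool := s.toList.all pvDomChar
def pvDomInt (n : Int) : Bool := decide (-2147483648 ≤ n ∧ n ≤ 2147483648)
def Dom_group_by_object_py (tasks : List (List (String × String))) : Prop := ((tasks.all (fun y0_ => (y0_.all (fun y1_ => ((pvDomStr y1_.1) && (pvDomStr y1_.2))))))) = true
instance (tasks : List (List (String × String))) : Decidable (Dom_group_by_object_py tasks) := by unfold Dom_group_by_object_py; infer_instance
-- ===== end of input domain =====

-- B differs from A: B collects distinct keys first, then builds each group by filtering per key (alternative decomposition, same return value).

-- key extraction shared by both sources: task.get("target_object") or task.get("object_name") or "default"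
-- (get returns None when missing; both None and "" are falsy, so getD with "" is exact)
def pvKeyOf (task : List (String × String)) : String :=
  let a := (PySem.Dict.mk task).getD "target_object" ""
  if a ≠ "" then a
  else
    let b := (PySem.Dict.mk task).getD "object_name" ""
    if b ≠ "" then b else "default"

-- ===== PORT A =====
def group_by_object_py (tasks : List (List (String × String))) : List (List (List (String × String))) :=
  (tasks.foldl (fun objects task =>
      let obj := pvKeyOf task
      let objects := if objects.contains obj then objects else objects.insert obj []
      objects.modify obj [] (· ++ [task]))
    PySem.Dict.empty).values

-- ===== PORT B =====
def group_by_object_py_alt (tasks : List (List (String × String))) : List (List (List (String × String))) :=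
  let order := tasks.foldl (fun order task => PySem.Set.add order (pvKeyOf task)) []
  order.map (fun k => tasks.filter (fun task => pvKeyOf task == k))

-- ===== PRECONDITION & SPEC =====
def Spec_group_by_object_py (tasks : List (List (String × String))) (out : List (List (List (String × String)))) : Prop := out = group_by_object_py_alt tasks
instance (tasks : List (List (String × String))) (out : List (List (List (String × String)))) : Decidable (Spec_group_by_object_py tasks out) := by unfold Spec_group_by_object_py; infer_instance

-- ===== CLAIM (what is proved, stated in full; the proofs are below) =====
def Claim_equal_group_by_object_py : Prop := ∀ (tasks : List (List (String × String))), Dom_group_by_object_py tasks → Spec_group_by_object_py tasks (group_by_object_py tasks)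

-- ===== LEMMAS AND PROOFS =====

-- A's loop body equals a bare modify: the "insert [] if missing" step only pre-creates the slot modify would create.
theorem pv_step_eq_modify (d : PySem.Dict String (List (List (String × String)))) (t : List (String × String)) :
    (let obj := pvKeyOf t
     let d' := if d.contains obj then d else d.insert obj []
     d'.modify obj [] (· ++ [t])) = d.modify (pvKeyOf t) [] (· ++ [t]) := by
  by_cases h : d.contains (pvKeyOf t) = true
  · simp [h]
  · simp only [Bool.not_eq_true] at h
    simp [h, PySem.Dict.modify, PySem.Dict.getD_insert_self, PySem.Dict.insert_insert_self,
      PySem.Dict.getD_of_not_contains]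

theorem group_by_object_py_spec : Claim_equal_group_by_object_py := by
  intro tasks _
  show group_by_object_py tasks = group_by_object_py_alt tasks
  unfold group_by_object_py group_by_object_py_alt
  have hfold : tasks.foldl (fun objects task =>
      let obj := pvKeyOf task
      let objects := if objects.contains obj then objects else objects.insert obj []
      objects.modify obj [] (· ++ [task])) PySem.Dict.empty
      = (tasks.map (fun t => (pvKeyOf t, t))).foldl
          (fun d p => d.modify p.1 [] (· ++ [p.2])) PySem.Dict.empty := by
    rw [List.foldl_map]
    congr 1
    funext d t
    exact pv_step_eq_modify d t
  rw [hfold]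
  set D := (tasks.map (fun t => (pvKeyOf t, t))).foldl
      (fun d p => d.modify p.1 [] (· ++ [p.2])) PySem.Dict.empty with hD
  have hnd : D.keys.Nodup := by
    rw [hD]
    have := PySem.Dict.nodup_keys_foldl_modify_key (tasks.map (fun t => (pvKeyOf t, t)))
      (fun p => p.1) [] (fun _ p => (· ++ [p.2])) PySem.Dict.empty (by simp [PySem.Dict.keys_empty])
    simpa using this
  have hkeys : D.keys = tasks.foldl (fun order task => PySem.Set.add order (pvKeyOf task)) [] := by
    rw [hD]
    rw [PySem.Dict.keys_foldl_modify_key]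
    simp [PySem.Set.update, PySem.Dict.keys_empty, List.map_map, List.foldl_map, Function.comp_def]
  have hget : ∀ k, D.getD k [] = tasks.filter (fun task => pvKeyOf task == k) := by
    intro k
    rw [hD, PySem.Dict.getD_foldl_modify_append, PySem.Dict.getD_empty]
    simp [List.filter_map, Function.comp_def]
  rw [PySem.Dict.values_eq_map_keys D hnd [], hkeys]
  exact List.map_congr_left (fun k _ => hget k)
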